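-- pv_equiv track=rewrite | github.com/LangasDev/QuechuaStemmer | quechua_stemmer_v0.9.py | multiple_stems
-- ===== SOURCE A (Python) =====
-- def multiple_stems(string, cur_len, suffixes, ordered):
-- 	for suf in suffixes:
-- 		if string.endswith(suf):
-- 			if suf == 'ku' and string.endswith(('yku', 'paku')):
-- 				return (string, cur_len)
-- 			l = len(suf)
-- 			if len(string)-l > 2:
-- 				string = string[:-l]
-- 				cur_len -= l
-- 				if not ordered:
-- 					suffixes.remove(suf)
-- 					(string, cur_len) = multiple_stems(string, cur_len, suffixes, False)
-- 					break
-- 			else: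
-- 				return (string, cur_len-l)
--
-- 	return (string, cur_len)
-- ===== SOURCE B (Python) =====
-- # Simpler decomposition: per-suffix branch logic factored into _step, the two modes
-- # split into flat loops (plain pass for ordered, while/for-else restart for not-ordered)
-- # instead of A's self-recursion.  Mutates `suffixes` via .remove exactly like A.
-- def _step(string, cur_len, suf):
--     """None = suffix doesn't match; ('stop', v) = return v now; ('strip', s, c) = stripped state."""
--     if not string.endswith(suf):
--         return None
--     if suf == 'ku' and string.endswith(('yku', 'paku')):
--         return ('stop', (string, cur_len))
--     l = len(suf)
--     if len(string) - l <= 2: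
--         return ('stop', (string, cur_len - l))
--     return ('strip', string[:-l], cur_len - l)
--
-- def multiple_stems(string, cur_len, suffixes, ordered):
--     if ordered:
--         for suf in suffixes:
--             r = _step(string, cur_len, suf)
--             if r is None:
--                 continue
--             if r[0] == 'stop':
--                 return r[1]
--             _, string, cur_len = r
--         return (string, cur_len)
--     while True:
--         for suf in suffixes:
--             r = _step(string, cur_len, suf)
--             if r is None:
--                 continue
--             if r[0] == 'stop':
--                 return r[1]
--             _, string, cur_len = r
--             suffixes.remove(suf)
--             break
--         else:
--             return (string, cur_len)
-- ===== Notes on version B (the rewrite author's own statement) =====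
-- stated objective: simpler
-- what changed: Replaces A's self-recursion with two flat loops split by mode: a plain single pass for ordered=True, and a while/for-else restart loop for ordered=False; the <=2 early return is inverted into a guard so stripping is the straight-line case.
import Mathlib
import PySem

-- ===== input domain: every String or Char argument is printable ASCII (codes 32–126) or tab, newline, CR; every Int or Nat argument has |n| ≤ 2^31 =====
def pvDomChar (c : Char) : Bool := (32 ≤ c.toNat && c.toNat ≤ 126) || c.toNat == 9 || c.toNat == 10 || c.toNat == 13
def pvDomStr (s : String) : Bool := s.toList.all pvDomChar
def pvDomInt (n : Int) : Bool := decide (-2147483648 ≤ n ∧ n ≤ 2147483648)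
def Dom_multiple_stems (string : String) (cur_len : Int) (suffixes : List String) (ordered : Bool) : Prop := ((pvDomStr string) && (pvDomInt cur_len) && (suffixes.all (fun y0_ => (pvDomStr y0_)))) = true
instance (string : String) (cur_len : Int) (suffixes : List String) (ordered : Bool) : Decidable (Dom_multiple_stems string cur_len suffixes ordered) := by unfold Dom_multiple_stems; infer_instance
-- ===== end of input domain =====

-- B replaces A's self-recursion by flat loops (mode split + while/for-else restart); equivalence is
-- about the RETURN value — both Pythons also mutate `suffixes` via .remove identically.

-- ===== PORT A =====
-- the ku/yku/paku guard of both Pythons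
def msKuGuard (string suf : String) : Bool :=
  suf == "ku" && (PySem.Str.endswith string "yku" || PySem.Str.endswith string "paku")

-- string[:-l]  (exact: for l = 0 Python's string[:-0] = string[:0] = "")
def msStrip (string : String) (l : Int) : String := PySem.Str.slice string none (some (-l))

-- A's `for suf in suffixes` body; `pending` is the part of the loop still to run.
-- fuel bounds the recursion depth of Python A (each recursive call removes one element
-- of `suffixes`, so `suffixes.length` fuel is always enough; fuel 0 is unreachable).
-- `suffixes.remove(suf)` never raises in A (suf is drawn from suffixes itself, which is
-- unmutated at that point), so it is exactly `List.erase`.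
def multiple_stems_go (fuel : Nat) (pending : List String) (string : String) (cur_len : Int)
    (suffixes : List String) (ordered : Bool) : String × Int :=
  match pending with
  | [] => (string, cur_len)
  | suf :: rest =>
    if PySem.Str.endswith string suf then
      if msKuGuard string suf then
        (string, cur_len)
      else
        let l : Int := PySem.Str.len suf
        if PySem.Str.len string - l > 2 then
          let string' := msStrip string l
          let cur_len' := cur_len - l
          if !ordered then
            let suffixes' := suffixes.erase suf
            match fuel with
            | 0 => (string', cur_len')   -- unreachable with fuel = suffixes.length
            | f + 1 => multiple_stems_go f suffixes' string' cur_len' suffixes' false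
          else
            multiple_stems_go fuel rest string' cur_len' suffixes ordered
        else
          (string, cur_len - l)
    else
      multiple_stems_go fuel rest string cur_len suffixes ordered
  termination_by (fuel, pending)

def multiple_stems (string : String) (cur_len : Int) (suffixes : List String) (ordered : Bool) : String × Int :=
  multiple_stems_go suffixes.length suffixes string cur_len suffixes ordered

-- ===== PORT B =====
-- B's _step: classify one suffix against the current string.
-- none = no match; .inl v = early return value ('stop'); .inr (s', c') = stripped state ('strip')
def msStep (string : String) (cur_len : Int) (suf : String) : Option ((String × Int) ⊕ (String × Int)) :=
  if PySem.Str.endswith string suf then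
    if msKuGuard string suf then some (.inl (string, cur_len))
    else
      let l : Int := PySem.Str.len suf
      if PySem.Str.len string - l ≤ 2 then some (.inl (string, cur_len - l))
      else some (.inr (msStrip string l, cur_len - l))
  else none

-- B's ordered branch: one plain pass over the suffix list, dispatching on _step
def msAltOrdered (pending : List String) (string : String) (cur_len : Int) : String × Int :=
  match pending with
  | [] => (string, cur_len)
  | suf :: rest =>
    match msStep string cur_len suf with
    | none => msAltOrdered rest string cur_len
    | some (.inl v) => v
    | some (.inr (s', c')) => msAltOrdered rest s' c'

-- B's inner `for … break/else` scan: `.inl` = an early return value,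
-- `.inr` = break with the stripped state and `suffixes.remove(suf)` applied,
-- `none` = the for-else (full pass, no strip)
def msAltScan (pending : List String) (string : String) (cur_len : Int)
    (suffixes : List String) : Option ((String × Int) ⊕ (String × Int × List String)) :=
  match pending with
  | [] => none
  | suf :: rest =>
    match msStep string cur_len suf with
    | none => msAltScan rest string cur_len suffixes
    | some (.inl v) => some (.inl v)
    | some (.inr (s', c')) => some (.inr (s', c', suffixes.erase suf))

-- B's `while True` restart loop (fuel = suffixes.length suffices: each restart shrinks the list)
def msAltWhile (fuel : Nat) (string : String) (cur_len : Int) (suffixes : List String) : String × Int :=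
  match msAltScan suffixes string cur_len suffixes with
  | some (.inl v) => v
  | some (.inr (s', c', sufs')) =>
    match fuel with
    | 0 => (s', c')   -- unreachable with fuel = suffixes.length
    | f + 1 => msAltWhile f s' c' sufs'
  | none => (string, cur_len)

def multiple_stems_alt (string : String) (cur_len : Int) (suffixes : List String) (ordered : Bool) : String × Int :=
  if ordered then msAltOrdered suffixes string cur_len
  else msAltWhile suffixes.length string cur_len suffixes

-- ===== PRECONDITION & SPEC =====
def Spec_multiple_stems (string : String) (cur_len : Int) (suffixes : List String) (ordered : Bool) (out : String × Int) : Prop := out = multiple_stems_alt string cur_len suffixes ordered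
instance (string : String) (cur_len : Int) (suffixes : List String) (ordered : Bool) (out : String × Int) : Decidable (Spec_multiple_stems string cur_len suffixes ordered out) := by unfold Spec_multiple_stems; infer_instance

-- ===== CLAIM (what is proved, stated in full; the proofs are below) =====
def Claim_equal_multiple_stems : Prop := ∀ (string : String) (cur_len : Int) (suffixes : List String) (ordered : Bool), Dom_multiple_stems string cur_len suffixes ordered → Spec_multiple_stems string cur_len suffixes ordered (multiple_stems string cur_len suffixes ordered)

-- ===== LEMMAS AND PROOFS =====

-- ordered = true: A's scan never recurses at the top level and equals B's plain pass
theorem go_ordered (fuel : Nat) (pending : List String) (string : String) (cur_len : Int)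
    (suffixes : List String) :
    multiple_stems_go fuel pending string cur_len suffixes true
      = msAltOrdered pending string cur_len := by
  induction pending generalizing string cur_len with
  | nil => simp [multiple_stems_go, msAltOrdered]
  | cons suf rest ih =>
    rw [multiple_stems_go, msAltOrdered, msStep]
    by_cases h1 : PySem.Chars.endswith string.toList suf.toList = true
    · by_cases h2 : msKuGuard string suf = true
      · simp [h1, h2]
      · simp only [h2]
        simp only [PySem.Str.endswith, PySem.Str.len_eq, Bool.not_true, Bool.false_eq_true,
          if_false]
        split_ifs with h3 h4
        all_goals first
          | rfl
          | exact ih _ _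
          | (simp only [String.length_toList] at *; omega)
    · simp only [PySem.Str.endswith, h1, Bool.false_eq_true, if_false]
      exact ih string cur_len

-- ordered = false: A's scan from any `pending` equals B's scan signal, dispatched
theorem go_unordered_scan (fuel : Nat) (pending : List String) (string : String) (cur_len : Int)
    (suffixes : List String) :
    multiple_stems_go fuel pending string cur_len suffixes false
      = (match msAltScan pending string cur_len suffixes with
         | some (.inl v) => v
         | some (.inr (s', c', sufs')) =>
           (match fuel with
            | 0 => (s', c')
            | f + 1 => multiple_stems_go f sufs' s' c' sufs' false)
         | none => (string, cur_len)) := by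
  induction pending generalizing string cur_len with
  | nil => simp [multiple_stems_go, msAltScan]
  | cons suf rest ih =>
    rw [multiple_stems_go, msAltScan, msStep]
    by_cases h1 : PySem.Chars.endswith string.toList suf.toList = true
    · by_cases h2 : msKuGuard string suf = true
      · simp [h1, h2]
      · simp only [h2]
        simp only [PySem.Str.endswith, PySem.Str.len_eq, Bool.not_false, if_true, if_false,
          Bool.false_eq_true]
        split_ifs with h3 h4
        all_goals first
          | rfl
          | (simp only [String.length_toList] at *; omega)
    · simp only [PySem.Str.endswith, h1, Bool.false_eq_true, if_false]
      exact ih string cur_len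

-- ordered = false: A's restart recursion equals B's while loop (same fuel)
theorem go_unordered (fuel : Nat) (string : String) (cur_len : Int) (suffixes : List String) :
    multiple_stems_go fuel suffixes string cur_len suffixes false
      = msAltWhile fuel string cur_len suffixes := by
  induction fuel generalizing string cur_len suffixes with
  | zero => rw [go_unordered_scan, msAltWhile]
  | succ f ih =>
    rw [go_unordered_scan, msAltWhile]
    rcases h : msAltScan suffixes string cur_len suffixes with _ | (v | ⟨s', c', sufs'⟩) <;>
      simp [ih]

-- ===== VERDICT (by name: the statement is the Claim_ definition above) =====
theorem multiple_stems_spec : Claim_equal_multiple_stems := by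
  intro string cur_len suffixes ordered _
  unfold Spec_multiple_stems multiple_stems multiple_stems_alt
  cases ordered with
  | true => simp [go_ordered]
  | false => simp [go_unordered]
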